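-- pv_equiv track=rewrite | github.com/Abhyuday-06/Low-tech-crisis-solution | crisis_advisor.py | encode_categorical
-- ===== SOURCE A (Python) =====
-- def encode_categorical(column):
--     """Converts a list of strings to a list of integers."""
--     mapping = {}
--     reverse_mapping = {}
--     encoded_column = []
--     next_id = 0
--
--     for val in column:
--         if val not in mapping:
--             mapping[val] = next_id
--             reverse_mapping[next_id] = val
--             next_id += 1
--         encoded_column.append(mapping[val])
--
--     return encoded_column, reverse_mapping
-- ===== SOURCE B (Python) =====
-- def encode_categorical(column):
--     """Converts a list of strings to a list of integers."""
--     first = {}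
--     for i, v in reversed(list(enumerate(column))):
--         first[v] = i
--     firsts = sorted(first.values())
--     rank = {pos: r for r, pos in enumerate(firsts)}
--     encoded_column = [rank[first[v]] for v in column]
--     reverse_mapping = {r: column[pos] for r, pos in enumerate(firsts)}
--     return encoded_column, reverse_mapping
-- ===== Notes on version B (the rewrite author's own statement) =====
-- stated objective: alternative
-- what changed: Instead of A's single forward loop growing two dicts with a counter, B scans the enumerated column BACKWARDS so that dict overwriting leaves each value's first-occurrence position, then sorts those positions, ranks them, and derives both the codes and the reverse mapping from position ranks.
import Mathlib
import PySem

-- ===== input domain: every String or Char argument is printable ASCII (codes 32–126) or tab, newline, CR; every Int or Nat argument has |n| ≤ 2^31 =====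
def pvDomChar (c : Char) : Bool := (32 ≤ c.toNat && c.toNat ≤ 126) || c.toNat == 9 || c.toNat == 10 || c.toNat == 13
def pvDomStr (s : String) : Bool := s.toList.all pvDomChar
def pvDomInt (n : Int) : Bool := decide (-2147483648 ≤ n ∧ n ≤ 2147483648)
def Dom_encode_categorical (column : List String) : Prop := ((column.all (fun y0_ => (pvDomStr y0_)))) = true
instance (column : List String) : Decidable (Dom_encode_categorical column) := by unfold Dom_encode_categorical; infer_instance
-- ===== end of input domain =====

-- B replaces A's forward loop (two dicts grown alongside a counter) by a position-based algorithm: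
-- a backward overwrite scan leaves first-occurrence positions, which are sorted and ranked; alternative, not faster.

-- ===== PORT A =====
def encode_categorical (column : List String) : List Int × (List (Int × String)) :=
  let st := column.foldl
    (fun (st : PySem.Dict String Int × PySem.Dict Int String × List Int × Int) val =>
      let mapping := st.1
      let reverse_mapping := st.2.1
      let encoded_column := st.2.2.1
      let next_id := st.2.2.2
      if mapping.contains val then
        (mapping, reverse_mapping, encoded_column ++ [mapping.getD val 0], next_id)
      else
        -- 'mapping[val]' read back after the insert is total: val was just inserted, getD's default is never used
        (mapping.insert val next_id, reverse_mapping.insert next_id val,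
         encoded_column ++ [(mapping.insert val next_id).getD val 0], next_id + 1))
    (PySem.Dict.empty, PySem.Dict.empty, [], 0)
  (st.2.2.1, st.2.1.items)

-- ===== PORT B =====
def encode_categorical_alt (column : List String) : List Int × (List (Int × String)) :=
  let first := ((PySem.List.enumerate column).reverse).foldl
    (fun (d : PySem.Dict String Int) p => d.insert p.2 p.1) PySem.Dict.empty
  let firsts := PySem.List.sorted first.values (fun x => x)
  let rank := (PySem.List.enumerate firsts).foldl
    (fun (d : PySem.Dict Int Int) p => d.insert p.2 p.1) PySem.Dict.empty
  -- 'rank[first[v]]' is total: every v of column is a key of first and its position is in firsts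
  let encoded_column := column.map (fun v => rank.getD (first.getD v 0) 0)
  -- 'column[pos]' is total: pos is a first-occurrence index into column
  let reverse_mapping := (PySem.List.enumerate firsts).foldl
    (fun (d : PySem.Dict Int String) p => d.insert p.1 ((PySem.List.pyGet? column p.2).getD "")) PySem.Dict.empty
  (encoded_column, reverse_mapping.items)

-- ===== PRECONDITION & SPEC =====
def Spec_encode_categorical (column : List String) (out : List Int × (List (Int × String))) : Prop := out = encode_categorical_alt column
instance (column : List String) (out : List Int × (List (Int × String))) : Decidable (Spec_encode_categorical column out) := by unfold Spec_encode_categorical; infer_instance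

-- ===== CLAIM (what is proved, stated in full; the proofs are below) =====
def Claim_equal_encode_categorical : Prop := ∀ (column : List String), Dom_encode_categorical column → Spec_encode_categorical column (encode_categorical column)

-- ===== LEMMAS AND PROOFS =====

-- forward dict {u[i] : i} and reverse dict {i : u[i]} of a unique list u
def fwdD {α : Type} [BEq α] (u : List α) : PySem.Dict α Int :=
  PySem.Dict.mk ((PySem.List.enumerate u).map (fun p => (p.2, p.1)))
def revD (u : List String) : PySem.Dict Int String :=
  PySem.Dict.mk (PySem.List.enumerate u)

-- the values of rest NOT already in u, in first-appearance order
def newU (u : List String) : List String → List String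
  | [] => []
  | v :: r => if v ∈ u then newU u r else v :: newU (u ++ [v]) r

-- the codes emitted for rest when the values of u already carry ids 0..len u - 1
def encRel (u : List String) : List String → List Int
  | [] => []
  | v :: r => if v ∈ u then (u.idxOf v : Int) :: encRel u r
              else (u.length : Int) :: encRel (u ++ [v]) r

theorem keys_fwdD {α : Type} [BEq α] (u : List α) : (fwdD u).keys = u := by
  simp only [fwdD, PySem.Dict.keys, List.map_map]
  simp only [Function.comp_def]
  exact PySem.List.map_snd_enumerate u 0

theorem contains_fwdD {α : Type} [BEq α] [LawfulBEq α] [DecidableEq α] (u : List α) (v : α) :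
    (fwdD u).contains v = decide (v ∈ u) := by
  rw [PySem.Dict.contains_eq_decide_mem_keys, keys_fwdD]

theorem nodup_keys_fwdD {α : Type} [BEq α] (u : List α) (hu : u.Nodup) : (fwdD u).keys.Nodup := by
  rw [keys_fwdD]; exact hu

theorem getD_fwdD {α : Type} [BEq α] [LawfulBEq α] (u : List α) (v : α) (hu : u.Nodup) (hv : v ∈ u) :
    (fwdD u).getD v 0 = (u.idxOf v : Int) := by
  have hlt : u.idxOf v < u.length := List.idxOf_lt_length_of_mem hv
  have hmem : (v, ((u.idxOf v : Nat) : Int)) ∈ (fwdD u).items := by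
    have h1 : (((u.idxOf v : Nat) : Int), v) ∈ PySem.List.enumerate u := by
      rw [PySem.List.mem_enumerate_iff]
      exact ⟨u.idxOf v, hlt, by simp⟩
    simpa [fwdD] using List.mem_map_of_mem (f := fun p => (p.2, p.1)) h1
  exact PySem.Dict.getD_of_mem_items _ hmem (nodup_keys_fwdD u hu) 0

theorem getD_fwdD_getElem {α : Type} [BEq α] [LawfulBEq α] (u : List α) (hu : u.Nodup)
    (j : Nat) (hj : j < u.length) : (fwdD u).getD u[j] 0 = (j : Int) := by
  have hmem : (u[j], ((j : Nat) : Int)) ∈ (fwdD u).items := by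
    have h1 : (((j : Nat) : Int), u[j]) ∈ PySem.List.enumerate u := by
      rw [PySem.List.mem_enumerate_iff]
      exact ⟨j, hj, by simp⟩
    simpa [fwdD] using List.mem_map_of_mem (f := fun p => (p.2, p.1)) h1
  exact PySem.Dict.getD_of_mem_items _ hmem (nodup_keys_fwdD u hu) 0

theorem insert_fwdD (u : List String) (v : String) (hv : v ∉ u) :
    (fwdD u).insert v (u.length : Int) = fwdD (u ++ [v]) := by
  apply PySem.Dict.ext
  have hc : (fwdD u).contains v = false := by simp [contains_fwdD, hv]
  rw [PySem.Dict.items_insert_of_not_contains _ _ hc]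
  simp [fwdD, PySem.List.enumerate_append, PySem.List.enumerate_cons, PySem.List.enumerate_nil]

theorem insert_revD (u : List String) (v : String) :
    (revD u).insert (u.length : Int) v = revD (u ++ [v]) := by
  apply PySem.Dict.ext
  have hc : (revD u).contains (u.length : Int) = false := by
    rw [PySem.Dict.contains_eq_decide_mem_keys]
    simp only [revD, PySem.Dict.keys, PySem.List.map_fst_enumerate]
    simp [PySem.List.mem_pyRange_one]
  rw [PySem.Dict.items_insert_of_not_contains _ _ hc]
  simp [revD, PySem.List.enumerate_append, PySem.List.enumerate_cons, PySem.List.enumerate_nil]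

-- the step function of A's loop
def stepA (st : PySem.Dict String Int × PySem.Dict Int String × List Int × Int) (val : String) :
    PySem.Dict String Int × PySem.Dict Int String × List Int × Int :=
  let mapping := st.1
  let reverse_mapping := st.2.1
  let encoded_column := st.2.2.1
  let next_id := st.2.2.2
  if mapping.contains val then
    (mapping, reverse_mapping, encoded_column ++ [mapping.getD val 0], next_id)
  else
    (mapping.insert val next_id, reverse_mapping.insert next_id val,
     encoded_column ++ [(mapping.insert val next_id).getD val 0], next_id + 1)

theorem loopA (rest : List String) : ∀ (u : List String) (e : List Int), u.Nodup →
    rest.foldl stepA (fwdD u, revD u, e, (u.length : Int)) =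
      (fwdD (u ++ newU u rest), revD (u ++ newU u rest), e ++ encRel u rest,
       ((u ++ newU u rest).length : Int)) := by
  induction rest with
  | nil => intro u e _; simp [newU, encRel]
  | cons v r ih =>
    intro u e hu
    by_cases hv : v ∈ u
    · have hstep : stepA (fwdD u, revD u, e, (u.length : Int)) v =
          (fwdD u, revD u, e ++ [(u.idxOf v : Int)], (u.length : Int)) := by
        simp [stepA, contains_fwdD, hv, getD_fwdD u v hu hv]
      rw [List.foldl_cons, hstep, ih u _ hu]
      simp [newU, encRel, hv]
    · have hnd : (u ++ [v]).Nodup := by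
        rw [List.nodup_append]
        exact ⟨hu, List.nodup_singleton v, fun a ha => by simp; exact fun h => hv (h ▸ ha)⟩
      have hidx : ((u ++ [v]).idxOf v : Int) = (u.length : Int) := by
        rw [List.idxOf_append_of_notMem hv]; simp
      have hstep : stepA (fwdD u, revD u, e, (u.length : Int)) v =
          (fwdD (u ++ [v]), revD (u ++ [v]), e ++ [(u.length : Int)],
           ((u ++ [v]).length : Int)) := by
        simp [stepA, contains_fwdD, hv, insert_fwdD u v hv, insert_revD u v,
          getD_fwdD (u ++ [v]) v hnd (by simp), hidx]
      rw [List.foldl_cons, hstep, ih (u ++ [v]) _ hnd]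
      simp [newU, encRel, hv, List.append_assoc]

theorem append_newU (rest : List String) : ∀ u : List String,
    u ++ newU u rest = PySem.Set.update u rest := by
  induction rest with
  | nil => intro u; simp [newU, PySem.Set.update_nil]
  | cons v r ih =>
    intro u
    rw [PySem.Set.update_cons]
    by_cases hv : v ∈ u
    · rw [PySem.Set.add_of_mem hv, ← ih u]
      simp only [newU, if_pos hv]
    · rw [PySem.Set.add_of_not_mem hv, ← ih (u ++ [v])]
      simp only [newU, if_neg hv, List.append_assoc, List.singleton_append]

theorem encRel_eq (rest : List String) : ∀ u : List String,
    encRel u rest = rest.map (fun v => (((u ++ newU u rest).idxOf v : Nat) : Int)) := by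
  induction rest with
  | nil => intro u; simp [encRel]
  | cons v r ih =>
    intro u
    by_cases hv : v ∈ u
    · simp only [encRel, newU, if_pos hv, List.map_cons]
      rw [ih u, List.idxOf_append_of_mem hv]
    · simp only [encRel, newU, if_neg hv, List.map_cons]
      have hhead : (((u ++ v :: newU (u ++ [v]) r).idxOf v : Nat) : Int) = (u.length : Int) := by
        rw [List.idxOf_append_of_notMem hv]; simp
      have h : u ++ [v] ++ newU (u ++ [v]) r = u ++ v :: newU (u ++ [v]) r := by simp
      rw [ih (u ++ [v]), h, hhead]

theorem map_fst_enumerate_nodup {α : Type} (u : List α) :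
    ((PySem.List.enumerate u).map (fun p => p.1)).Nodup :=
  List.Pairwise.map _ (fun _ _ h' => ne_of_lt h') (PySem.List.pairwise_lt_enumerate u 0)

theorem mappingB_eq {α : Type} [BEq α] [LawfulBEq α] (u : List α) (hu : u.Nodup) :
    (PySem.List.enumerate u).foldl
      (fun (d : PySem.Dict α Int) p => d.insert p.2 p.1) PySem.Dict.empty = fwdD u := by
  apply PySem.Dict.ext
  have h := PySem.Dict.items_foldl_insert_fresh (PySem.List.enumerate u)
    (fun p => p.2) (fun p => p.1) (PySem.Dict.empty : PySem.Dict α Int)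
    (fun a _ => by simp [PySem.Dict.contains_empty])
    (by simpa [Function.comp_def] using (PySem.List.map_snd_enumerate u 0) ▸ hu)
  simpa [fwdD] using h

-- B-side: lookup in the backward-overwrite fold is the FIRST (forward) binding
theorem get?_foldl_insert_swap {κ ν : Type} [BEq κ] [LawfulBEq κ] [DecidableEq κ]
    (qs : List (ν × κ)) : ∀ (d : PySem.Dict κ ν) (k : κ),
    (qs.foldl (fun d p => d.insert p.2 p.1) d).get? k =
      ((qs.reverse.find? (fun p => p.2 == k)).map (fun p => p.1)).or (d.get? k) := by
  induction qs with
  | nil => intro d k; simp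
  | cons q t ih =>
    intro d k
    rw [List.foldl_cons, ih, List.reverse_cons, List.find?_append]
    cases h : t.reverse.find? (fun p => p.2 == k) with
    | some p => simp
    | none =>
      by_cases hk : k = q.2
      · subst hk; simp [PySem.Dict.get?_insert_self]
      · simp [PySem.Dict.get?_insert, hk, Ne.symm hk]

theorem find?_enumerate_eq {α : Type} [BEq α] [LawfulBEq α] (xs : List α) (v : α) :
    v ∈ xs → ∀ s : Int, (PySem.List.enumerate xs s).find? (fun p => p.2 == v) =
      some (s + ((xs.idxOf v : Nat) : Int), v) := by
  induction xs with
  | nil => intro h; cases h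
  | cons x t ih =>
    intro hv s
    rw [PySem.List.enumerate_cons]
    by_cases hx : x = v
    · subst hx; simp [List.idxOf_cons_self]
    · have hvt : v ∈ t := by cases hv with | head => exact absurd rfl hx | tail _ h => exact h
      have : (x == v) = false := by simp [hx]
      rw [List.find?_cons, this, ih hvt (s + 1)]
      have : t.idxOf v + 1 = (x :: t).idxOf v := by
        rw [List.idxOf_cons, this]; rfl
      rw [← this]; push_cast; ring_nf

-- the dict `first` of B: lookup = first-occurrence index, keys = distinct values of the reversed column
theorem firstB_getD (column : List String) (v : String) (hv : v ∈ column) :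
    (((PySem.List.enumerate column).reverse).foldl
      (fun (d : PySem.Dict String Int) p => d.insert p.2 p.1) PySem.Dict.empty).getD v 0 =
      ((column.idxOf v : Nat) : Int) := by
  rw [PySem.Dict.getD_eq_get?_getD, get?_foldl_insert_swap, List.reverse_reverse,
    find?_enumerate_eq column v hv 0]
  simp

theorem firstB_keys (column : List String) :
    (((PySem.List.enumerate column).reverse).foldl
      (fun (d : PySem.Dict String Int) p => d.insert p.2 p.1) PySem.Dict.empty).keys =
      PySem.Set.ofList column.reverse := by
  have h := PySem.Dict.keys_foldl_insert_key ((PySem.List.enumerate column).reverse)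
    (fun p => p.2) (fun _ p => p.1) (PySem.Dict.empty : PySem.Dict String Int)
  rw [h, PySem.Dict.keys_empty, PySem.Set.update_nil_left, List.map_reverse,
    PySem.List.map_snd_enumerate]

theorem pairwise_idxOf_ofList {α : Type} [BEq α] [LawfulBEq α] (xs : List α) :
    (PySem.Set.ofList xs).Pairwise (fun a b => xs.idxOf a < xs.idxOf b) := by
  induction xs with
  | nil => simp [PySem.Set.ofList]
  | cons x t ih =>
    rw [PySem.Set.ofList_cons]
    constructor
    · intro b hb
      have hbx : b ≠ x := by
        have := List.of_mem_filter hb; simpa using this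
      have : (x == b) = false := by simp [Ne.symm hbx]
      rw [List.idxOf_cons_self, List.idxOf_cons, this]
      simp
    · have hsub : ((PySem.Set.ofList t).discard x).Sublist (PySem.Set.ofList t) :=
        List.filter_sublist
      have hp : ((PySem.Set.ofList t).discard x).Pairwise (fun a b => t.idxOf a < t.idxOf b) :=
        List.Pairwise.sublist hsub ih
      refine hp.imp_of_mem ?_
      intro a b ha hb hab
      have hax : a ≠ x := by have := List.of_mem_filter ha; simpa using this
      have hbx : b ≠ x := by have := List.of_mem_filter hb; simpa using this
      have h1 : (x == a) = false := by simp [Ne.symm hax]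
      have h2 : (x == b) = false := by simp [Ne.symm hbx]
      rw [List.idxOf_cons, List.idxOf_cons, h1, h2]
      simpa using hab

-- ===== VERDICT pieces =====
theorem encode_categorical_spec : Claim_equal_encode_categorical := by
  intro column _
  unfold Spec_encode_categorical
  show encode_categorical column = encode_categorical_alt column
  set U := PySem.Set.ofList column with hUdef
  have hUnodup : U.Nodup := PySem.Set.nodup_ofList column
  -- ---------- port A ----------
  have hloop := loopA column [] [] List.nodup_nil
  have hfull : ([] : List String) ++ newU [] column = U := by
    rw [append_newU column [], PySem.Set.update_nil_left]
  rw [hfull] at hloop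
  have henc : encRel [] column = column.map (fun v => ((U.idxOf v : Nat) : Int)) := by
    rw [encRel_eq column []]
    simp only [hfull]
  have hA : encode_categorical column =
      (column.map (fun v => ((U.idxOf v : Nat) : Int)), (revD U).items) := by
    unfold encode_categorical
    have : column.foldl
        (fun (st : PySem.Dict String Int × PySem.Dict Int String × List Int × Int) val =>
          let mapping := st.1
          let reverse_mapping := st.2.1
          let encoded_column := st.2.2.1
          let next_id := st.2.2.2
          if mapping.contains val then
            (mapping, reverse_mapping, encoded_column ++ [mapping.getD val 0], next_id)
          else
            (mapping.insert val next_id, reverse_mapping.insert next_id val,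
             encoded_column ++ [(mapping.insert val next_id).getD val 0], next_id + 1))
        (PySem.Dict.empty, PySem.Dict.empty, [], 0) =
        column.foldl stepA (fwdD [], revD [], [], (([] : List String).length : Int)) := rfl
    rw [this]
    simp only [hloop]
    rw [henc]; simp
  -- ---------- port B ----------
  -- the dict of first-occurrence positions
  set firstD := ((PySem.List.enumerate column).reverse).foldl
    (fun (d : PySem.Dict String Int) p => d.insert p.2 p.1) PySem.Dict.empty with hfirstD
  have hkeys : firstD.keys = PySem.Set.ofList column.reverse := firstB_keys column
  have hkeysnd : firstD.keys.Nodup := by rw [hkeys]; exact PySem.Set.nodup_ofList _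
  have hkeymem : ∀ v ∈ firstD.keys, v ∈ column := by
    intro v hv; rw [hkeys, PySem.Set.mem_ofList, List.mem_reverse] at hv; exact hv
  -- F: the first-occurrence positions in first-appearance order
  set F := U.map (fun v => ((column.idxOf v : Nat) : Int)) with hFdef
  have hFpw : F.Pairwise (fun a b => a < b) := by
    rw [hFdef, List.pairwise_map]
    exact (pairwise_idxOf_ofList column).imp (fun h => by exact_mod_cast h)
  have hFnd : F.Nodup := hFpw.imp (fun h => ne_of_lt h)
  have hvals : firstD.values = firstD.keys.map (fun v => firstD.getD v 0) :=
    PySem.Dict.values_eq_map_keys firstD hkeysnd 0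
  have hvalsmap : firstD.values =
      (PySem.Set.ofList column.reverse).map (fun v => ((column.idxOf v : Nat) : Int)) := by
    rw [hvals, hkeys]
    exact List.map_congr_left (fun v hv => firstB_getD column v
      (by rw [PySem.Set.mem_ofList, List.mem_reverse] at hv; exact hv))
  have hperm : F.Perm firstD.values := by
    rw [hvalsmap, hFdef]
    refine List.Perm.map _ ?_
    rw [List.perm_ext_iff_of_nodup hUnodup (PySem.Set.nodup_ofList _)]
    intro a
    rw [hUdef, PySem.Set.mem_ofList, PySem.Set.mem_ofList, List.mem_reverse]
  have hsorted : PySem.List.sorted firstD.values (fun x => x) = F :=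
    PySem.List.sorted_eq_of_perm_of_pairwise_lt _ _ _ hperm hFpw
  -- rank dict
  have hrank : (PySem.List.enumerate F).foldl
      (fun (d : PySem.Dict Int Int) p => d.insert p.2 p.1) PySem.Dict.empty = fwdD F :=
    mappingB_eq F hFnd
  -- encoded column
  have hFlen : F.length = U.length := by rw [hFdef, List.length_map]
  have hencB : column.map (fun v => (fwdD F).getD (firstD.getD v 0) 0) =
      column.map (fun v => ((U.idxOf v : Nat) : Int)) := by
    refine List.map_congr_left (fun v hv => ?_)
    have hvU : v ∈ U := by rw [hUdef, PySem.Set.mem_ofList]; exact hv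
    have hj : U.idxOf v < U.length := List.idxOf_lt_length_of_mem hvU
    have hjF : U.idxOf v < F.length := by rw [hFlen]; exact hj
    have hUj : U[U.idxOf v] = v := List.getElem_idxOf hj
    have hFj : F[U.idxOf v]'hjF = ((column.idxOf v : Nat) : Int) := by
      simp only [hFdef, List.getElem_map]
      rw [hUj]
    rw [firstB_getD column v hv, ← hFj]
    exact getD_fwdD_getElem F hFnd (U.idxOf v) hjF
  -- reverse mapping
  have hrevB : ((PySem.List.enumerate F).foldl
      (fun (d : PySem.Dict Int String) p =>
        d.insert p.1 ((PySem.List.pyGet? column p.2).getD "")) PySem.Dict.empty).items =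
      PySem.List.enumerate U := by
    have h := PySem.Dict.items_foldl_insert_fresh (PySem.List.enumerate F)
      (fun p => p.1) (fun p => (PySem.List.pyGet? column p.2).getD "")
      (PySem.Dict.empty : PySem.Dict Int String)
      (fun a _ => by simp [PySem.Dict.contains_empty])
      (map_fst_enumerate_nodup F)
    have hemp : (PySem.Dict.empty : PySem.Dict Int String).items = [] := rfl
    rw [h, hemp, List.nil_append]
    apply List.ext_getElem
    · rw [List.length_map, PySem.List.length_enumerate, PySem.List.length_enumerate, hFlen]
    · intro k h1 h2
      have hkF : k < F.length := by
        simpa [PySem.List.length_enumerate] using h1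
      have hkU : k < U.length := by rw [← hFlen]; exact hkF
      have hmm : U[k] ∈ U := List.getElem_mem hkU
      have hUk : U[k] ∈ column := (PySem.Set.mem_ofList column _).mp hmm
      have hidxlt : column.idxOf U[k] < column.length := List.idxOf_lt_length_of_mem hUk
      have hFk : F[k] = ((column.idxOf U[k] : Nat) : Int) := by
        simp [hFdef]
      have hval : (PySem.List.pyGet? column (F[k]'hkF)).getD "" = U[k] := by
        rw [hFk, PySem.List.pyGet?_natCast, List.getElem?_eq_getElem hidxlt]
        simp [List.getElem_idxOf hidxlt]
      rw [List.getElem_map, PySem.List.getElem_enumerate, PySem.List.getElem_enumerate]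
      simp [hval]
  -- ---------- assemble ----------
  rw [hA]
  simp only [encode_categorical_alt]
  rw [← hfirstD, hsorted, hrank, hrevB, hencB]
  -- remaining: reverse dicts' items agree
  simp [revD]
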